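-- pv_equiv track=rewrite | github.com/runport-io/ipfeb22 | alt_html.py | detect_tokens
-- ===== SOURCE A (Python) =====
-- QUOTATION = '"'
--
-- SPACE = " "
--
-- def detect_tokens(string):
--     """
--
--     detect_tokens() -> list
--
--     Returns a list of tokens in the string, where the string follows the
--     convention for assigning values in HTML (ie, 'key1="value1" key2="value2"').
--     """
--     tokens = list()
--     wip = string
--     length = len(wip)
--
--     parsing = False
--     token = ""
--     quotes = 0
--
--     for i in range(length):
--         char = wip[i]
--         if not parsing:
--             if char == SPACE:
--                 continue
--             else:
--                 parsing = True
--                 # start parsing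
--                 token += char
--                 # simple, won't differentiate
--                 continue
--         else:
--             token += char
--             if char == QUOTATION:
--                 quotes += 1
--                 if quotes == 2:
--
--                     parsing = False
--                     tokens.append(token)
--                     quotes = 0
--                     token = ""
--                     # can move the append and token reset to the start op
--
--     return tokens
-- ===== SOURCE B (Python) =====
-- QUOTATION = '"'
--
-- SPACE = " "
--
-- def detect_tokens(string):
--     """
--     detect_tokens() -> list
--
--     Index-based scanner: skip spaces, then locate the two closing quotes with
--     str.find (searching from index 1, so an opening quote is never counted)
--     and slice the token out; incomplete trailing tokens are dropped.
--     """
--     tokens = []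
--     rest = string
--     while rest:
--         if rest[0] == SPACE:
--             rest = rest[1:]
--             continue
--         first = rest.find(QUOTATION, 1)
--         if first == -1:
--             break
--         second = rest.find(QUOTATION, first + 1)
--         if second == -1:
--             break
--         tokens.append(rest[:second + 1])
--         rest = rest[second + 1:]
--     return tokens
-- ===== Notes on version B (the rewrite author's own statement) =====
-- stated objective: faster
-- what changed: Replaced the per-character state machine (parsing flag, token accumulator, quote counter) by a scanner that skips spaces and jumps straight to the two closing quotes with str.find, slicing each token out in one step.
import Mathlib
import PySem

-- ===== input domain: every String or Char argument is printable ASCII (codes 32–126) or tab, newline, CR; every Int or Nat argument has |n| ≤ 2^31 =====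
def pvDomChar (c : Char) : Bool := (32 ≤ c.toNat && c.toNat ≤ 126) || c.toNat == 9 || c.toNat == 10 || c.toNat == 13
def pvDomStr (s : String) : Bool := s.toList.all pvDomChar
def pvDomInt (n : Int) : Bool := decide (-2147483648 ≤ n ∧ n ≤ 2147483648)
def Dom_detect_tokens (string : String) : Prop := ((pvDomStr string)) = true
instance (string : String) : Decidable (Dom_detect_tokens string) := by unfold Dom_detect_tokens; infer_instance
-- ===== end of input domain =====

-- B replaces A's per-character state machine by a str.find-based scanner (measurably faster by a constant factor); return values proved equal on all inputs.

-- ===== PORT A =====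
-- state = (tokens, parsing, token, quotes); token strings built as List Char, turned into String at the end
def stepA (st : List (List Char) × Bool × List Char × Nat) (c : Char) :
    List (List Char) × Bool × List Char × Nat :=
  let (tokens, parsing, token, quotes) := st
  if ¬ parsing then
    if c = ' ' then st
    else (tokens, true, token ++ [c], quotes)
  else
    let token := token ++ [c]
    if c = '"' then
      let quotes := quotes + 1
      if quotes = 2 then (tokens ++ [token], false, [], 0)
      else (tokens, true, token, quotes)
    else (tokens, true, token, quotes)

def detect_tokens (string : String) : List String :=
  ((string.toList.foldl stepA ([], false, [], 0)).1).map (fun t => String.ofList t)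

-- ===== PORT B =====
-- rest.find('"', k) = PySem.Chars.findFrom rest ['"'] k none; in the taken branches the
-- find results are ≥ 0, so rest[:second+1] / rest[second+1:] are take/drop at second.toNat+1 (exact)
def goB : List Char → List (List Char)
  | [] => []
  | c :: rest =>
    if c = ' ' then goB rest
    else
      let first := PySem.Chars.findFrom (c :: rest) ['"'] 1 none
      if first = -1 then []
      else
        let second := PySem.Chars.findFrom (c :: rest) ['"'] (first + 1) none
        if second = -1 then []
        else (c :: rest).take (second.toNat + 1) :: goB ((c :: rest).drop (second.toNat + 1))
  termination_by cs => cs.length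
  decreasing_by all_goals simp

def detect_tokens_alt (string : String) : List String :=
  (goB string.toList).map (fun t => String.ofList t)

-- ===== PRECONDITION & SPEC =====
def Spec_detect_tokens (string : String) (out : List String) : Prop := out = detect_tokens_alt string
instance (string : String) (out : List String) : Decidable (Spec_detect_tokens string out) := by unfold Spec_detect_tokens; infer_instance

-- ===== CLAIM (what is proved, stated in full; the proofs are below) =====
def Claim_equal_detect_tokens : Prop := ∀ (string : String), Dom_detect_tokens string → Spec_detect_tokens string (detect_tokens string)

-- ===== LEMMAS AND PROOFS =====

-- first index of a quote, structurally
def qidx : List Char → Option Nat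
  | [] => none
  | c :: rest => if c = '"' then some 0 else (qidx rest).map (· + 1)

theorem qidx_none_iff (cs : List Char) : qidx cs = none ↔ '"' ∉ cs := by
  induction cs with
  | nil => simp [qidx]
  | cons c rest ih =>
    by_cases h : c = '"'
    · simp [qidx, h]
    · simp [qidx, h, Option.map_eq_none_iff, ih]
      intro _
      exact fun he => h he.symm

theorem qidx_some_spec (cs : List Char) (j : Nat) (h : qidx cs = some j) :
    j < cs.length ∧ cs[j]? = some '"' ∧ ∀ i < j, cs[i]? ≠ some '"' := by
  induction cs generalizing j with
  | nil => simp [qidx] at h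
  | cons c rest ih =>
    by_cases hc : c = '"'
    · simp [qidx, hc] at h; subst h; simp [hc]
    · simp [qidx, hc] at h
      obtain ⟨j', hj', rfl⟩ := h
      obtain ⟨h1, h2, h3⟩ := ih j' hj'
      refine ⟨by simp only [List.length_cons]; omega, by simpa using h2, ?_⟩
      intro i hi
      cases i with
      | zero => simp [hc]
      | succ i => simpa using h3 i (by omega)

theorem sq_prefix_iff (l : List Char) (i : Nat) :
    (['"'] <+: l.drop i) ↔ l[i]? = some '"' := by
  rcases h : l.drop i with _ | ⟨b, t⟩
  · simp [← List.head?_drop, h]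
  · have hb : l[i]? = some b := by rw [← List.head?_drop, h]; rfl
    simp [hb, List.cons_prefix_cons, eq_comm]

theorem cs_infix_of_get (cs : List Char) (j : Nat) (h : cs[j]? = some '"') :
    ['"'] <:+: cs := by
  have h1 : (∃ i, ['"'] <+: cs.drop i) := ⟨j, (sq_prefix_iff cs j).mpr h⟩
  exact (PySem.Chars.isIn_iff_infix _ _).mp
    ((PySem.Chars.exists_prefix_drop_iff_isIn ['"'] cs).mp h1)
theorem find_eq_qidx (cs : List Char) :
    PySem.Chars.find cs ['"'] =
      (match qidx cs with | none => (-1 : Int) | some j => (j : Int)) := by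
  cases hq : qidx cs with
  | none =>
    have hmem : '"' ∉ cs := (qidx_none_iff cs).mp hq
    refine (PySem.Chars.find_eq_neg_one_iff _ _).mpr ?_
    intro hinf
    have h1 : PySem.Chars.isIn ['"'] cs = true := (PySem.Chars.isIn_iff_infix _ _).mpr hinf
    obtain ⟨j, hj⟩ := (PySem.Chars.exists_prefix_drop_iff_isIn ['"'] cs).mpr h1
    have := (sq_prefix_iff cs j).mp hj
    exact hmem (by
      have : '"' ∈ cs := List.mem_of_getElem? this
      exact this)
  | some j =>
    obtain ⟨hlt, hget, hmin⟩ := qidx_some_spec cs j hq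
    have hnn : 0 ≤ PySem.Chars.find cs ['"'] :=
      (PySem.Chars.find_nonneg_iff _ _).mpr (cs_infix_of_get cs j hget)
    obtain ⟨hpf, hminf⟩ := PySem.Chars.find_spec hnn
    have hgf : cs[(PySem.Chars.find cs ['"']).toNat]? = some '"' := (sq_prefix_iff cs _).mp hpf
    have h1 : j ≤ (PySem.Chars.find cs ['"']).toNat := by
      by_contra h
      exact hmin _ (by omega) hgf
    have h2 : (PySem.Chars.find cs ['"']).toNat ≤ j := by
      by_contra h
      exact hminf j (by omega) ((sq_prefix_iff cs j).mpr hget)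
    have hj : (PySem.Chars.find cs ['"']).toNat = j := by omega
    show PySem.Chars.find cs ['"'] = (j : Int)
    omega

-- foldl from a parsing state with one quote seen
theorem Q1 (cs : List Char) (toks : List (List Char)) (t : List Char) :
    List.foldl stepA (toks, true, t, 1) cs =
      (match qidx cs with
        | none => (toks, true, t ++ cs, 1)
        | some j => List.foldl stepA (toks ++ [t ++ cs.take (j + 1)], false, [], 0) (cs.drop (j + 1))) := by
  induction cs generalizing t with
  | nil => simp [qidx]
  | cons c rest ih =>
    by_cases hc : c = '"'
    · subst hc; simp [qidx, stepA]
    · have hstep : stepA (toks, true, t, 1) c = (toks, true, t ++ [c], 1) := by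
        simp [stepA, hc]
      rw [List.foldl_cons, hstep, ih]
      cases hq : qidx rest <;>
        simp [qidx, hc, hq, List.take_succ_cons, List.drop_succ_cons]

-- foldl from a parsing state with no quote seen
theorem Q0 (cs : List Char) (toks : List (List Char)) (t : List Char) :
    List.foldl stepA (toks, true, t, 0) cs =
      (match qidx cs with
        | none => (toks, true, t ++ cs, 0)
        | some j => List.foldl stepA (toks, true, t ++ cs.take (j + 1), 1) (cs.drop (j + 1))) := by
  induction cs generalizing t with
  | nil => simp [qidx]
  | cons c rest ih =>
    by_cases hc : c = '"'
    · subst hc; simp [qidx, stepA]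
    · have hstep : stepA (toks, true, t, 0) c = (toks, true, t ++ [c], 0) := by
        simp [stepA, hc]
      rw [List.foldl_cons, hstep, ih]
      cases hq : qidx rest <;>
        simp [qidx, hc, hq, List.take_succ_cons, List.drop_succ_cons]

theorem mainA (cs : List Char) (toks : List (List Char)) :
    (List.foldl stepA (toks, false, [], 0) cs).1 = toks ++ goB cs := by
  cases cs with
  | nil => simp [goB]
  | cons c rest =>
    by_cases hc : c = ' '
    · have h1 : stepA (toks, false, [], 0) c = (toks, false, [], 0) := by
        simp [stepA, hc]
      rw [List.foldl_cons, h1, mainA rest toks]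
      simp [goB, hc]
    · have h1 : stepA (toks, false, [], 0) c = (toks, true, [c], 0) := by
        simp [stepA, hc]
      rw [List.foldl_cons, h1, Q0]
      have hone : PySem.Chars.findFrom (c :: rest) ['"'] 1 none =
          if PySem.Chars.find rest ['"'] = -1 then -1 else 1 + PySem.Chars.find rest ['"'] := by
        have := PySem.Chars.findFrom_natCast (c :: rest) ['"'] 1 (by simp)
        simpa using this
      cases hq : qidx rest with
      | none =>
        have hfr : PySem.Chars.findFrom (c :: rest) ['"'] 1 none = -1 := by
          rw [hone]; simp [find_eq_qidx, hq]
        simp [goB, hc, hfr]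
      | some j =>
        have hjlt : j < rest.length := (qidx_some_spec rest j hq).1
        have hfr : PySem.Chars.findFrom (c :: rest) ['"'] 1 none = (1 + j : Int) := by
          rw [hone]; simp [find_eq_qidx, hq]
        dsimp only
        rw [Q1]
        cases hq2 : qidx (rest.drop (j + 1)) with
        | none =>
          have hsec : PySem.Chars.findFrom (c :: rest) ['"'] ((1 + (j : Int)) + 1) none = -1 := by
            have hcast : ((1 : Int) + (j : Int)) + 1 = (((j + 2 : Nat) : Nat) : Int) := by
              push_cast; ring
            rw [hcast, PySem.Chars.findFrom_natCast (c :: rest) ['"'] (j + 2) (by simp; omega)]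
            have hdrop : (c :: rest).drop (j + 2) = rest.drop (j + 1) := by
              simp [List.drop_succ_cons]
            rw [hdrop]
            simp [find_eq_qidx, hq2]
          simp only [goB, hc, hfr]
          simp only [show ¬((1 : Int) + (j : Int) = -1) by omega, if_false]
          rw [show (1 + (j : Int)) + 1 = ((1 : Int) + (j : Int)) + 1 from rfl] at hsec
          simp [hsec]
        | some j2 =>
          have hj2lt : j2 < (rest.drop (j + 1)).length := (qidx_some_spec _ j2 hq2).1
          have hsec : PySem.Chars.findFrom (c :: rest) ['"'] ((1 + (j : Int)) + 1) none =
              ((j + 2 + j2 : Nat) : Int) := by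
            have hcast : ((1 : Int) + (j : Int)) + 1 = (((j + 2 : Nat) : Nat) : Int) := by
              push_cast; ring
            rw [hcast, PySem.Chars.findFrom_natCast (c :: rest) ['"'] (j + 2) (by simp; omega)]
            have hdrop : (c :: rest).drop (j + 2) = rest.drop (j + 1) := by
              simp [List.drop_succ_cons]
            rw [hdrop]
            simp [find_eq_qidx, hq2]
          rw [mainA ((rest.drop (j + 1)).drop (j2 + 1)) _]
          have htoNat : ((j + 2 + j2 : Nat) : Int).toNat = j + 2 + j2 := by omega
          have htake : (c :: rest).take (j + 2 + j2 + 1) =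
              c :: (rest.take (j + 1) ++ (rest.drop (j + 1)).take (j2 + 1)) := by
            rw [List.take_succ_cons, show j + 2 + j2 = (j + 1) + (j2 + 1) by omega,
              List.take_add]
          have hdropBig : (c :: rest).drop (j + 2 + j2 + 1) =
              (rest.drop (j + 1)).drop (j2 + 1) := by
            rw [List.drop_succ_cons, List.drop_drop]
            congr 1
            omega
          simp only [goB, hc, hfr]
          simp only [show ¬((1 : Int) + (j : Int) = -1) by omega, ite_false]
          rw [show (1 + (j : Int)) + 1 = ((1 : Int) + (j : Int)) + 1 from rfl] at hsec
          rw [hsec]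
          simp only [show ¬(((j + 2 + j2 : Nat) : Int) = -1) by omega, ite_false, htoNat,
            htake, hdropBig]
          simp
  termination_by cs.length
  decreasing_by
    all_goals simp

-- ===== VERDICT (by name: the statement is the Claim_ definition above) =====
theorem detect_tokens_spec : Claim_equal_detect_tokens := by
  intro s _
  unfold Spec_detect_tokens detect_tokens detect_tokens_alt
  rw [show (List.foldl stepA ([], false, [], 0) s.toList).1 = [] ++ goB s.toList from mainA _ _]
  simp
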